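-- pv_equiv track=rewrite | github.com/LorenzoBoers/ChargeCars | ARCHIVED/metadata_comparison_smartsuite_xano.py | categorize_smartsuite_tables
-- ===== SOURCE A (Python) =====
-- from typing import Dict, List, Set, Any
--
-- def categorize_smartsuite_tables(tables: List[Dict]) -> Dict[str, List[str]]:
--     """Categorize SmartSuite tables by business function"""
--     categories = {
--         "Core Business": [],
--         "Orders & Projects": [],
--         "Operations": [],
--         "Forms & Intake": [],
--         "Financial": [],
--         "System & Admin": [],
--         "Archive/Concept": [],
--         "Unmapped": []
--     }
--
--     for table in tables:
--         name = table.get('name', '')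
--
--         if any(keyword in name.lower() for keyword in ['eindklanten', 'partners', 'organisaties', 'medewerkers', 'members']):
--             categories["Core Business"].append(name)
--         elif any(keyword in name.lower() for keyword in ['orders', 'offertes', 'bestellingen', 'projecten']):
--             categories["Orders & Projects"].append(name)
--         elif any(keyword in name.lower() for keyword in ['bezoeken', 'werkbonnen', 'teams', 'bussen', 'auto']):
--             categories["Operations"].append(name)
--         elif any(keyword in name.lower() for keyword in ['intake', 'formulieren', 'media']):
--             categories["Forms & Intake"].append(name)
--         elif any(keyword in name.lower() for keyword in ['facturen', 'betalingen', 'stripe']):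
--             categories["Financial"].append(name)
--         elif any(keyword in name.lower() for keyword in ['users', 'api', 'tokens', 'system']):
--             categories["System & Admin"].append(name)
--         elif any(keyword in name.lower() for keyword in ['archief', 'concept', 'oud', '2022', '2023']):
--             categories["Archive/Concept"].append(name)
--         else:
--             categories["Unmapped"].append(name)
--
--     return categories
-- ===== SOURCE B (Python) =====
-- from typing import Dict, List, Any
--
-- CATEGORY_KEYWORDS = [
--     ("Core Business", ['eindklanten', 'partners', 'organisaties', 'medewerkers', 'members']),
--     ("Orders & Projects", ['orders', 'offertes', 'bestellingen', 'projecten']),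
--     ("Operations", ['bezoeken', 'werkbonnen', 'teams', 'bussen', 'auto']),
--     ("Forms & Intake", ['intake', 'formulieren', 'media']),
--     ("Financial", ['facturen', 'betalingen', 'stripe']),
--     ("System & Admin", ['users', 'api', 'tokens', 'system']),
--     ("Archive/Concept", ['archief', 'concept', 'oud', '2022', '2023']),
-- ]
--
--
-- def _classify(name: str) -> str:
--     lname = name.lower()
--     for cat, kws in CATEGORY_KEYWORDS:
--         if any(kw in lname for kw in kws):
--             return cat
--     return "Unmapped"
--
--
-- def categorize_smartsuite_tables(tables: List[Dict]) -> Dict[str, List[str]]: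
--     """Categorize SmartSuite tables by business function"""
--     labeled = [(_classify(t.get('name', '')), t.get('name', '')) for t in tables]
--     cats = [c for c, _ in CATEGORY_KEYWORDS] + ["Unmapped"]
--     return {c: [n for l, n in labeled if l == c] for c in cats}
-- ===== Notes on version B (the rewrite author's own statement) =====
-- stated objective: idiomatic
-- what changed: Replaces the hard-coded if/elif bucket-append loop with a data-driven (category, keywords) table: each name is classified once, then the result dict is built per category by grouping the labelled names.
import Mathlib
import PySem

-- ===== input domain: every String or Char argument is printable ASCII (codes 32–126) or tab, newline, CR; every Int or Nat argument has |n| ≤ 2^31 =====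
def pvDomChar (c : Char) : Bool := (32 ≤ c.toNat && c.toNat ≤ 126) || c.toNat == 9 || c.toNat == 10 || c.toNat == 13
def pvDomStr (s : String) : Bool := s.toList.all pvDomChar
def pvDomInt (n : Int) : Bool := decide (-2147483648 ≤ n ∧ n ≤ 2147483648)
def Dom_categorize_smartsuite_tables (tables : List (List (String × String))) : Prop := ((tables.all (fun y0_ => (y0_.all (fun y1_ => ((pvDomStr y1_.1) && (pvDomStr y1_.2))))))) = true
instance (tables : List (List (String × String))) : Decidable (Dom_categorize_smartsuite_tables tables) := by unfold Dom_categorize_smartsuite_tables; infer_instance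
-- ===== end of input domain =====

-- B replaces A's hard-coded if/elif bucket-append loop by a data-driven keyword table:
-- classify each name once, then group the labelled names per category (same cost, more idiomatic).

-- table.get('name', ''): first-match association-list lookup
def pyGetName (t : List (String × String)) : String := (List.lookup "name" t).getD ""

-- any(keyword in name.lower() for keyword in kws)
def kwHit (kws : List String) (name : String) : Bool :=
  kws.any (fun kw => PySem.Str.isIn kw (PySem.Str.lower name))

-- ===== PORT A =====
def catsInit : PySem.Dict String (List String) :=
  PySem.Dict.mk [("Core Business", []), ("Orders & Projects", []), ("Operations", []),
    ("Forms & Intake", []), ("Financial", []), ("System & Admin", []),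
    ("Archive/Concept", []), ("Unmapped", [])]

def stepA (d : PySem.Dict String (List String)) (t : List (String × String)) :
    PySem.Dict String (List String) :=
  let name := pyGetName t
  if kwHit ["eindklanten", "partners", "organisaties", "medewerkers", "members"] name then
    d.modify "Core Business" [] (· ++ [name])
  else if kwHit ["orders", "offertes", "bestellingen", "projecten"] name then
    d.modify "Orders & Projects" [] (· ++ [name])
  else if kwHit ["bezoeken", "werkbonnen", "teams", "bussen", "auto"] name then
    d.modify "Operations" [] (· ++ [name])
  else if kwHit ["intake", "formulieren", "media"] name then
    d.modify "Forms & Intake" [] (· ++ [name])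
  else if kwHit ["facturen", "betalingen", "stripe"] name then
    d.modify "Financial" [] (· ++ [name])
  else if kwHit ["users", "api", "tokens", "system"] name then
    d.modify "System & Admin" [] (· ++ [name])
  else if kwHit ["archief", "concept", "oud", "2022", "2023"] name then
    d.modify "Archive/Concept" [] (· ++ [name])
  else
    d.modify "Unmapped" [] (· ++ [name])

def categorize_smartsuite_tables (tables : List (List (String × String))) : List (String × List String) :=
  (tables.foldl stepA catsInit).items

-- ===== PORT B =====
def categoryKeywords : List (String × List String) :=
  [("Core Business", ["eindklanten", "partners", "organisaties", "medewerkers", "members"]),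
   ("Orders & Projects", ["orders", "offertes", "bestellingen", "projecten"]),
   ("Operations", ["bezoeken", "werkbonnen", "teams", "bussen", "auto"]),
   ("Forms & Intake", ["intake", "formulieren", "media"]),
   ("Financial", ["facturen", "betalingen", "stripe"]),
   ("System & Admin", ["users", "api", "tokens", "system"]),
   ("Archive/Concept", ["archief", "concept", "oud", "2022", "2023"])]

-- the 'for cat, kws in CATEGORY_KEYWORDS: if any(...): return cat' loop
def classifyGo : List (String × List String) → String → String
  | [], _ => "Unmapped"
  | (c, kws) :: rest, lname =>
    if kws.any (fun kw => PySem.Str.isIn kw lname) then c else classifyGo rest lname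

def classify (name : String) : String := classifyGo categoryKeywords (PySem.Str.lower name)

def categorize_smartsuite_tables_alt (tables : List (List (String × String))) : List (String × List String) :=
  let labeled := tables.map (fun t => (classify (pyGetName t), pyGetName t))
  (categoryKeywords.map (·.1) ++ ["Unmapped"]).map
    (fun c => (c, labeled.filterMap (fun p => if p.1 == c then some p.2 else none)))

-- ===== PRECONDITION & SPEC =====
def Spec_categorize_smartsuite_tables (tables : List (List (String × String))) (out : List (String × List String)) : Prop := out = categorize_smartsuite_tables_alt tables
instance (tables : List (List (String × String))) (out : List (String × List String)) : Decidable (Spec_categorize_smartsuite_tables tables out) := by unfold Spec_categorize_smartsuite_tables; infer_instance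

-- ===== CLAIM (what is proved, stated in full; the proofs are below) =====
def Claim_equal_categorize_smartsuite_tables : Prop := ∀ (tables : List (List (String × String))), Dom_categorize_smartsuite_tables tables → Spec_categorize_smartsuite_tables tables (categorize_smartsuite_tables tables)

-- ===== LEMMAS AND PROOFS =====

-- A's if/elif chain picks exactly the key that classify computes.
lemma stepA_eq (d : PySem.Dict String (List String)) (t : List (String × String)) :
    stepA d t = d.modify (classify (pyGetName t)) [] (· ++ [pyGetName t]) := by
  simp only [stepA, classify, classifyGo, categoryKeywords, kwHit]
  split_ifs <;> rfl

lemma classify_mem (name : String) : classify name ∈ catsInit.keys := by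
  simp only [classify, classifyGo, categoryKeywords, catsInit, PySem.Dict.keys_mk]
  split_ifs <;> simp

lemma filterMap_eq_filter_map {α β : Type} (p : α → Bool) (f : α → β) (l : List α) :
    l.filterMap (fun x => if p x then some (f x) else none)
      = (l.filter p).map f := by
  induction l with
  | nil => rfl
  | cons x xs ih => by_cases h : p x <;> simp [h, ih]

-- ===== VERDICT (by name: the statement is the Claim_ definition above) =====
theorem categorize_smartsuite_tables_spec : Claim_equal_categorize_smartsuite_tables := by
  intro tables _
  unfold Spec_categorize_smartsuite_tables
  unfold categorize_smartsuite_tables categorize_smartsuite_tables_alt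
  -- A's fold is a modify-append loop over the labelled pairs
  have hfold : tables.foldl stepA catsInit
      = (tables.map (fun t => (classify (pyGetName t), pyGetName t))).foldl
          (fun d p => d.modify p.1 [] (· ++ [p.2])) catsInit := by
    rw [List.foldl_map]
    exact PySem.List.foldl_congr_mem tables _ _ catsInit (fun d t _ => stepA_eq d t)
  set labeled := tables.map (fun t => (classify (pyGetName t), pyGetName t)) with hlab
  rw [hfold]
  set D := labeled.foldl (fun d p => d.modify p.1 [] (· ++ [p.2])) catsInit with hD
  -- keys are unchanged: every classify result is already a key of catsInit
  have hkeys : D.keys = catsInit.keys := by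
    rw [hD, PySem.Dict.keys_foldl_modify_key]
    rw [PySem.Set.update_eq_append_filter]
    have : (PySem.Set.ofList (labeled.map (·.1))).filter
        (fun y => !(PySem.Set.contains catsInit.keys y)) = [] := by
      rw [List.filter_eq_nil_iff]
      intro y hy
      have hy' : y ∈ labeled.map (·.1) := (PySem.Set.mem_ofList _ _).mp hy
      obtain ⟨p, hp, rfl⟩ := List.mem_map.mp hy'
      obtain ⟨t, _, rfl⟩ := List.mem_map.mp (hlab ▸ hp)
      simpa using classify_mem (pyGetName t)
    rw [this, List.append_nil]
  have hnd : D.keys.Nodup := by rw [hkeys]; decide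
  rw [PySem.Dict.items_eq_map_keys D hnd []]
  rw [hkeys]
  have hgetD : ∀ c, D.getD c [] = catsInit.getD c [] ++ (labeled.filter (fun p => p.1 == c)).map (·.2) := by
    intro c; rw [hD]; exact PySem.Dict.getD_foldl_modify_append ..
  have hcats : catsInit.keys = categoryKeywords.map (·.1) ++ ["Unmapped"] := by decide
  rw [hcats]
  apply List.map_congr_left
  intro c hc
  rw [hgetD c, filterMap_eq_filter_map (fun p => p.1 == c) (·.2) labeled]
  have hinit : catsInit.getD c [] = [] := by
    fin_cases hc <;> decide
  rw [hinit, List.nil_append]
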